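-- pv_equiv track=rewrite | github.com/xiongyuchuan3294/api-data-gen | api-data-gen/src/api_data_gen/services/planning_service.py | _collect_sample_values
-- ===== SOURCE A (Python) =====
-- def _collect_sample_values(sample_rows: list[dict[str, str]]) -> dict[str, list[str]]:
--     values: dict[str, list[str]] = {}
--     for row in sample_rows:
--         for key, value in row.items():
--             if value in {"[NULL]", "[DEFAULT]"}:
--                 continue
--             values.setdefault(key, [])
--             if value not in values[key]:
--                 values[key].append(value)
--     return values
-- ===== SOURCE B (Python) =====
-- def _collect_sample_values(sample_rows: list[dict[str, str]]) -> dict[str, list[str]]: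
--     SENTINELS = ("[NULL]", "[DEFAULT]")
--     pairs = [(k, v) for row in sample_rows for k, v in row.items() if v not in SENTINELS]
--     keys = list(dict.fromkeys(k for k, _ in pairs))
--     by_key: dict[str, list[str]] = {}
--     for k, v in pairs:
--         by_key.setdefault(k, []).append(v)
--     return {k: list(dict.fromkeys(by_key.get(k, []))) for k in keys}
-- ===== Notes on version B (the rewrite author's own statement) =====
-- stated objective: alternative
-- what changed: B works in three staged passes over a flattened pair list: it first filters all non-sentinel (key, value) pairs into one flat list, derives the key order by deduplicating the key column, groups the values per key, and only then deduplicates each group once; A instead grows its dict incrementally with a membership scan of the growing value list before every append.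
import Mathlib
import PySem

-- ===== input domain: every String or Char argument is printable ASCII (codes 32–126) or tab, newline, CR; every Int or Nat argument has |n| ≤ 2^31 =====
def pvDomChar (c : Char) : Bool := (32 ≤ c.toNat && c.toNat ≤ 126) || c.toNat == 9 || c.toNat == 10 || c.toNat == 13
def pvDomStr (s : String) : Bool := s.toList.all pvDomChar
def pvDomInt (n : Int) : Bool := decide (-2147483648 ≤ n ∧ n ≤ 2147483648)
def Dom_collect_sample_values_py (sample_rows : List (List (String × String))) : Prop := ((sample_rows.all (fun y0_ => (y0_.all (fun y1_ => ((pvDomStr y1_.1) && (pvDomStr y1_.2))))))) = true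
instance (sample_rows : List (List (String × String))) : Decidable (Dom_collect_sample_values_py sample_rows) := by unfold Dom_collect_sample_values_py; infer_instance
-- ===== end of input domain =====

-- B flattens all non-sentinel (key, value) pairs into one list, gets the key order by
-- deduplicating the key column, and builds each entry by filtering + deduplicating that
-- flat list per key; A instead grows a dict and scans the list before every append.
-- Objective: alternative (different decomposition, similar cost).

-- ===== PORT A =====
-- Python dicts are ported as association lists in insertion order; keys are unique, so
-- `values.setdefault(key, []); if value not in values[key]: values[key].append(value)`
-- is the first-match update below (appending a fresh key at the end when absent).
def pvStepA (d : List (String × List String)) (k v : String) : List (String × List String) :=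
  match d with
  | [] => [(k, [v])]
  | (k', vs) :: t =>
      if k' = k then (k', if v ∈ vs then vs else vs ++ [v]) :: t
      else (k', vs) :: pvStepA t k v

def collect_sample_values_py (sample_rows : List (List (String × String))) : List (String × List String) :=
  sample_rows.foldl
    (fun d row => row.foldl
      (fun d kv => if kv.2 = "[NULL]" ∨ kv.2 = "[DEFAULT]" then d else pvStepA d kv.1 kv.2) d)
    []

-- ===== PORT B =====
-- `if v not in SENTINELS` inside the flattening comprehension:
def pvNonSent (kv : String × String) : Bool := !(kv.2 == "[NULL]" || kv.2 == "[DEFAULT]")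

def collect_sample_values_py_alt (sample_rows : List (List (String × String))) : List (String × List String) :=
  -- pairs = [(k, v) for row in sample_rows for k, v in row.items() if v not in SENTINELS]
  let pairs := sample_rows.flatMap (fun row => row.filter pvNonSent)
  -- keys = list(dict.fromkeys(k for k, _ in pairs))
  let keys := PySem.List.dedup (pairs.map Prod.fst)
  -- by_key = {}; for k, v in pairs: by_key.setdefault(k, []).append(v)
  let by_key := pairs.foldl
    (fun d kv => PySem.Dict.insert d kv.1 (PySem.Dict.getD d kv.1 [] ++ [kv.2]))
    PySem.Dict.empty
  -- {k: list(dict.fromkeys(by_key.get(k, []))) for k in keys}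
  keys.map (fun k => (k, PySem.List.dedup (PySem.Dict.getD by_key k [])))

-- ===== PRECONDITION & SPEC =====
def Spec_collect_sample_values_py (sample_rows : List (List (String × String))) (out : List (String × List String)) : Prop := out = collect_sample_values_py_alt sample_rows
instance (sample_rows : List (List (String × String))) (out : List (String × List String)) : Decidable (Spec_collect_sample_values_py sample_rows out) := by unfold Spec_collect_sample_values_py; infer_instance

-- ===== CLAIM =====
def Claim_equal_collect_sample_values_py : Prop := ∀ (sample_rows : List (List (String × String))), Dom_collect_sample_values_py sample_rows → Spec_collect_sample_values_py sample_rows (collect_sample_values_py sample_rows)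

-- ===== LEMMAS AND PROOFS =====

-- B's per-pairs-list result, as a function of an arbitrary flat pair list
def pvG (ps : List (String × String)) : List (String × List String) :=
  (PySem.List.dedup (ps.map Prod.fst)).map
    (fun k => (k, PySem.List.dedup ((ps.filter (fun kv => kv.1 == k)).map Prod.snd)))

-- dict.fromkeys dedup of a snoc
theorem pv_dedup_snoc {α : Type} [BEq α] [LawfulBEq α] (xs : List α) (v : α) :
    PySem.List.dedup (xs ++ [v]) =
      if v ∈ PySem.List.dedup xs then PySem.List.dedup xs else PySem.List.dedup xs ++ [v] := by
  simp [PySem.List.dedup, PySem.Set.ofList, List.foldl_append, PySem.Set.add]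

-- pvStepA on a keyed map with nodup keys
theorem pv_stepA_map_mem (K : List String) (h : String → List String) (k v : String)
    (hnd : K.Nodup) (hk : k ∈ K) :
    pvStepA (K.map (fun k' => (k', h k'))) k v =
      K.map (fun k' => (k', if k' = k then (if v ∈ h k' then h k' else h k' ++ [v]) else h k')) := by
  induction K with
  | nil => cases hk
  | cons a t ih =>
      simp only [List.map_cons, pvStepA]
      by_cases ha : a = k
      · subst ha
        have hat : a ∉ t := (List.nodup_cons.mp hnd).1
        have ht : (t.map (fun k' => ((k', if k' = a then (if v ∈ h k' then h k' else h k' ++ [v]) else h k') : String × List String)))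
            = t.map (fun k' => (k', h k')) := by
          refine List.map_congr_left (fun x hx => ?_)
          have hx' : x ≠ a := fun e => hat (e ▸ hx)
          simp [hx']
        simp [ht]
      · have hkt : k ∈ t := by
          rcases List.mem_cons.mp hk with h1 | h1
          · exact absurd h1.symm ha
          · exact h1
        simp [ha, ih (List.nodup_cons.mp hnd).2 hkt]

theorem pv_stepA_map_not_mem (K : List String) (h : String → List String) (k v : String)
    (hk : k ∉ K) :
    pvStepA (K.map (fun k' => (k', h k'))) k v =
      K.map (fun k' => (k', h k')) ++ [(k, [v])] := by
  induction K with
  | nil => simp [pvStepA]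
  | cons a t ih =>
      have ha : a ≠ k := fun e => hk (e ▸ List.mem_cons_self)
      simp only [List.map_cons, pvStepA, if_neg ha, List.cons_append, List.cons.injEq, true_and]
      exact ih (fun m => hk (List.mem_cons_of_mem a m))

-- filtering a snoc per key
theorem pv_filter_snoc (ps : List (String × String)) (k v k' : String) :
    ((ps ++ [(k, v)]).filter (fun kv => kv.1 == k')).map Prod.snd =
      (ps.filter (fun kv => kv.1 == k')).map Prod.snd ++ (if k = k' then [v] else []) := by
  by_cases h : k = k' <;> simp [List.filter_append, h]

theorem pv_filter_not_mem (ps : List (String × String)) (k : String)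
    (hk : k ∉ ps.map Prod.fst) :
    ps.filter (fun kv => kv.1 == k) = [] := by
  refine List.filter_eq_nil_iff.mpr (fun kv hkv => ?_)
  have : kv.1 ≠ k := fun e => hk (e ▸ List.mem_map_of_mem hkv)
  simp [this]

-- one pair: pvStepA commutes with pvG
theorem pv_stepA_G (ps : List (String × String)) (k v : String) :
    pvStepA (pvG ps) k v = pvG (ps ++ [(k, v)]) := by
  unfold pvG
  have hnd : (PySem.List.dedup (ps.map Prod.fst)).Nodup := PySem.List.nodup_dedup _
  have hkeys : PySem.List.dedup ((ps ++ [(k, v)]).map Prod.fst) =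
      if k ∈ PySem.List.dedup (ps.map Prod.fst) then PySem.List.dedup (ps.map Prod.fst)
      else PySem.List.dedup (ps.map Prod.fst) ++ [k] := by
    simpa using pv_dedup_snoc (ps.map Prod.fst) k
  by_cases hk : k ∈ PySem.List.dedup (ps.map Prod.fst)
  · rw [pv_stepA_map_mem _ _ _ _ hnd hk, hkeys, if_pos hk]
    refine List.map_congr_left (fun k' _ => ?_)
    by_cases h' : k' = k
    · subst h'
      have e : (if k' = k' then [v] else ([] : List String)) = [v] := if_pos rfl
      rw [pv_filter_snoc, e, pv_dedup_snoc]
      simp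
    · have h2 : k ≠ k' := fun e => h' e.symm
      rw [pv_filter_snoc]
      simp [h', h2]
  · rw [pv_stepA_map_not_mem _ _ _ _ hk, hkeys, if_neg hk, List.map_append]
    congr 1
    · refine List.map_congr_left (fun k' hk' => ?_)
      have h2 : k ≠ k' := fun e => hk (e ▸ hk')
      rw [pv_filter_snoc]
      simp [h2]
    · have hf : ps.filter (fun kv => kv.1 == k) = [] :=
        pv_filter_not_mem ps k (fun m => hk ((PySem.List.mem_dedup _ _).mpr m))
      simp [hf, PySem.List.dedup, PySem.Set.ofList, PySem.Set.add, PySem.Set.empty]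

-- the pvStepA fold over any flat pair list computes pvG
theorem pv_foldA_G (ps qs : List (String × String)) :
    ps.foldl (fun d kv => pvStepA d kv.1 kv.2) (pvG qs) = pvG (qs ++ ps) := by
  induction ps generalizing qs with
  | nil => simp
  | cons p t ih =>
      simp only [List.foldl_cons]
      rw [pv_stepA_G]
      simpa using ih (qs ++ [p])

-- A's inner row loop = a pvStepA fold over the row's non-sentinel pairs
theorem pv_rowA (row : List (String × String)) (d : List (String × List String)) :
    row.foldl
      (fun d kv => if kv.2 = "[NULL]" ∨ kv.2 = "[DEFAULT]" then d else pvStepA d kv.1 kv.2) d =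
    (row.filter pvNonSent).foldl (fun d kv => pvStepA d kv.1 kv.2) d := by
  induction row generalizing d with
  | nil => rfl
  | cons kv t ih =>
      rw [List.foldl_cons, List.filter_cons]
      by_cases h : kv.2 = "[NULL]" ∨ kv.2 = "[DEFAULT]"
      · have hb : pvNonSent kv = false := by rcases h with h | h <;> simp [pvNonSent, h]
        rw [if_pos h, hb]
        simpa using ih d
      · have hb : pvNonSent kv = true := by
          push_neg at h
          simp [pvNonSent, h.1, h.2]
        rw [if_neg h, hb]
        simpa using ih (pvStepA d kv.1 kv.2)

-- A's whole nested loop = the pvStepA fold over the flattened non-sentinel pairs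
theorem pv_A_flat (rows : List (List (String × String))) (d : List (String × List String)) :
    rows.foldl
      (fun d row => row.foldl
        (fun d kv => if kv.2 = "[NULL]" ∨ kv.2 = "[DEFAULT]" then d else pvStepA d kv.1 kv.2) d)
      d =
    (rows.flatMap (fun row => row.filter pvNonSent)).foldl
      (fun d kv => pvStepA d kv.1 kv.2) d := by
  induction rows generalizing d with
  | nil => rfl
  | cons row t ih =>
      rw [List.foldl_cons, List.flatMap_cons, List.foldl_append, pv_rowA]
      exact ih _

-- the grouping fold collects, per key, exactly the filtered value column
theorem pv_groupD (ps : List (String × String)) (d : PySem.Dict String (List String)) (k : String) :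
    PySem.Dict.getD
      (ps.foldl (fun d kv => PySem.Dict.insert d kv.1 (PySem.Dict.getD d kv.1 [] ++ [kv.2])) d) k [] =
    PySem.Dict.getD d k [] ++ ((ps.filter (fun kv => kv.1 == k)).map Prod.snd) := by
  induction ps generalizing d with
  | nil => simp
  | cons p t ih =>
      rw [List.foldl_cons, List.filter_cons, ih]
      by_cases h : p.1 = k
      · simp [PySem.Dict.getD_insert, h]
      · have h2 : ¬ k = p.1 := fun e => h e.symm
        simp [PySem.Dict.getD_insert, h, h2]

-- ===== VERDICT =====
theorem collect_sample_values_py_spec : Claim_equal_collect_sample_values_py := by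
  intro rows _
  show collect_sample_values_py rows = collect_sample_values_py_alt rows
  unfold collect_sample_values_py collect_sample_values_py_alt
  rw [pv_A_flat]
  have h := pv_foldA_G (rows.flatMap (fun row => row.filter pvNonSent)) []
  have h0 : pvG ([] : List (String × String)) = [] := rfl
  rw [h0] at h
  rw [h]
  unfold pvG
  refine List.map_congr_left (fun k _ => ?_)
  rw [pv_groupD]
  simp [PySem.Dict.getD, PySem.Dict.get?, PySem.Dict.empty]
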